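-- pv_equiv track=rewrite | github.com/ho3j/Python-Exercises | 1-Python_Programming_Language_Practice/D11_Function.py | f
-- ===== SOURCE A (Python) =====
-- def f(s):
--     my_set = set()
--     w = s.split()
--     for i in w:
--         if i in my_set:
--             return i
--         else:
--             my_set.add(i)
--     return 'None'
-- ===== SOURCE B (Python) =====
-- def f(s):
--     w = s.split()
--     for i in range(len(w)):
--         for j in range(i):
--             if w[i] == w[j]:
--                 return w[i]
--     return 'None'
-- ===== Notes on version B (the rewrite author's own statement) =====
-- stated objective: alternative
-- what changed: Replaced the growing set of seen words by a nested index scan: for each position i the inner loop compares w[i] against all earlier positions j < i and returns w[i] on the first match.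
import Mathlib
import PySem

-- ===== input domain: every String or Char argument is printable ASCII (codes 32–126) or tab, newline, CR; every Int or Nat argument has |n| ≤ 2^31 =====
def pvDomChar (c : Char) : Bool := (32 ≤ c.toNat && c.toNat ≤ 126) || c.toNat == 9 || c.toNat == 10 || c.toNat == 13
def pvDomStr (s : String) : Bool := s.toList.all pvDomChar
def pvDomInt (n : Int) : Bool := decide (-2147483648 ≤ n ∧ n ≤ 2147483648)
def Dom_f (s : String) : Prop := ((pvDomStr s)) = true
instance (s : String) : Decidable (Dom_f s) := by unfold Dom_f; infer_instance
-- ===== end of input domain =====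

-- B replaces A's growing seen-set by a nested index scan (compare w[i] with every earlier w[j]); alternative decomposition, not faster.

-- ===== PORT A =====
-- the for-loop over the words, carrying the set `my_set`
def fLoop : List String → PySem.Set String → String
  | [], _ => "None"
  | i :: rest, st =>
    if PySem.Set.contains st i then i else fLoop rest (PySem.Set.add st i)

def f (s : String) : String := fLoop (PySem.Str.split₀ s) PySem.Set.empty

-- ===== PORT B =====
-- inner loop: `for j in range(i): if w[i] == w[j]: return w[i]`
def fAltInner (w : List String) (i : Int) : List Int → Option String
  | [] => none
  | j :: js =>
    if PySem.List.pyGetD w i "" = PySem.List.pyGetD w j "" then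
      some (PySem.List.pyGetD w i "")
    else fAltInner w i js

-- outer loop: `for i in range(len(w)): …`
def fAltOuter (w : List String) : List Int → String
  | [] => "None"
  | i :: is' =>
    match fAltInner w i (PySem.List.pyRange 0 i) with
    | some r => r
    | none => fAltOuter w is'

def f_alt (s : String) : String :=
  let w := PySem.Str.split₀ s
  fAltOuter w (PySem.List.pyRange 0 (w.length : Int))

-- ===== PRECONDITION & SPEC =====
def Spec_f (s : String) (out : String) : Prop := out = f_alt s
instance (s : String) (out : String) : Decidable (Spec_f s out) := by unfold Spec_f; infer_instance

-- ===== CLAIM (what is proved, stated in full; the proofs are below) =====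
def Claim_equal_f : Prop := ∀ (s : String), Dom_f s → Spec_f s (f s)

-- ===== LEMMAS AND PROOFS =====

-- reference loop: scan the words keeping the list of already-seen words (in order)
def seenScan (seen : List String) : List String → String
  | [] => "None"
  | x :: rest => if seen.contains x then x else seenScan (seen ++ [x]) rest

theorem fLoop_eq (ws : List String) (st : List String) :
    fLoop ws st = seenScan st ws := by
  induction ws generalizing st with
  | nil => rfl
  | cons x rest ih =>
    by_cases h : x ∈ st
    · simp [fLoop, seenScan, PySem.Set.contains, h]
    · simp [fLoop, seenScan, PySem.Set.contains, PySem.Set.add, h, ih]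

theorem inner_eq (w : List String) (k : Nat) (hk : k < w.length) :
    ∀ n a, a ≤ k → k - a = n →
    fAltInner w (k : Int) (PySem.List.pyRange (a : Int) (k : Int)) =
      if w[k] ∈ (w.drop a).take (k - a) then some w[k] else none := by
  intro n
  induction n with
  | zero =>
    intro a ha h0
    have hak : ((a : Int)) = (k : Int) := by exact_mod_cast (by omega : a = k)
    rw [hak]
    have hnil : PySem.List.pyRange (k : Int) (k : Int) = [] := by simp [pysem]
    rw [hnil]
    simp [fAltInner, (by omega : k - a = 0)]
  | succ m ih =>
    intro a ha h0
    have halt : a < k := by omega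
    rw [PySem.List.pyRange_one_cons (by exact_mod_cast halt)]
    have hcast : ((a : Int) + 1) = ((a + 1 : Nat) : Int) := by push_cast; ring
    have haw : a < w.length := by omega
    have hget : ∀ (j : Nat) (hj : j < w.length), PySem.List.pyGetD w (j : Int) "" = w[j]'hj := by
      intro j hj
      simp [PySem.List.pyGetD_natCast, List.getD_eq_getElem?_getD, List.getElem?_eq_getElem hj]
    have hdrop : w.drop a = w[a] :: w.drop (a + 1) :=
      List.drop_eq_getElem_cons haw
    have htake : (w.drop a).take (k - a) = w[a] :: (w.drop (a + 1)).take (k - (a + 1)) := by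
      rw [hdrop]
      have : k - a = (k - (a + 1)) + 1 := by omega
      rw [this, List.take_succ_cons]
    simp only [fAltInner, hget k hk, hget a haw, hcast]
    rw [ih (a + 1) (by omega) (by omega), htake]
    by_cases he : w[k] = w[a]
    · simp [he]
    · simp [he, List.mem_cons]

theorem outer_eq (w : List String) :
    ∀ n k, k ≤ w.length → w.length - k = n →
    fAltOuter w (PySem.List.pyRange (k : Int) (w.length : Int)) =
      seenScan (w.take k) (w.drop k) := by
  intro n
  induction n with
  | zero =>
    intro k hk h0
    have : k = w.length := by omega
    subst this
    have hnil : PySem.List.pyRange (w.length : Int) (w.length : Int) = [] := by simp [pysem]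
    rw [hnil]
    simp [fAltOuter, seenScan]
  | succ m ih =>
    intro k hk h0
    have hklt : k < w.length := by omega
    rw [PySem.List.pyRange_one_cons (by exact_mod_cast hklt)]
    have hcast : ((k : Int) + 1) = ((k + 1 : Nat) : Int) := by push_cast; ring
    simp only [fAltOuter, hcast]
    have hinner := inner_eq w k hklt k 0 (by omega) (by omega)
    norm_num at hinner
    rw [hinner]
    have hdrop : w.drop k = w[k] :: w.drop (k + 1) :=
      List.drop_eq_getElem_cons hklt
    rw [hdrop]
    by_cases hin : w[k] ∈ w.take k
    · simp [seenScan, hin]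
    · have htk : w.take k ++ [w[k]] = w.take (k + 1) := by
        rw [List.take_add_one]
        simp [List.getElem?_eq_getElem hklt]
      simp only [seenScan, hin, List.contains_iff_mem, if_false, htk]
      exact ih (k + 1) (by omega) (by omega)

-- ===== VERDICT (by name: the statement is the Claim_ definition above) =====
theorem f_spec : Claim_equal_f := by
  intro s _
  unfold Spec_f f f_alt
  rw [fLoop_eq]
  have := outer_eq (PySem.Str.split₀ s) (PySem.Str.split₀ s).length 0 (by omega) (by omega)
  simpa [PySem.Set.empty] using this.symm
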